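-- pv_equiv track=rewrite | github.com/RUSH3D-HR/RUSH3D-HR | Code/utils.py | get_lf_ind_list
-- ===== SOURCE A (Python) =====
-- def get_lf_ind_list(batch_id_list, group_mode, total_wigner_num, nshift=3):
--     if nshift == 3: batch_num = 45
--     elif nshift == 5: batch_num = 100
--     elif nshift == 15: batch_num = 225
--     else: raise Exception('nshift must be 3, 5 or 15')
--     batch_step = batch_num if group_mode == 0 else batch_num - nshift**2 + 1
--     batch_max_len = batch_num if group_mode == 0 else 2 * batch_num - nshift**2 + 1
--     lf_id0 = 0
--     while lf_id0 + batch_max_len <= total_wigner_num: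
--         lf_id1 = lf_id0 + batch_num
--         batch_id_list.append([lf_id0, lf_id1])
--         lf_id0 += batch_step
--     else:
--         batch_id_list.append([lf_id0, total_wigner_num])
--
--     return batch_id_list#返回每一个batch的起止wigner索引
-- ===== SOURCE B (Python) =====
-- def get_lf_ind_list(batch_id_list, group_mode, total_wigner_num, nshift=3):
--     # Builds the result back-to-front: the tail pair first, then full intervals
--     # prepended while walking DOWN from the last full start. Mutates batch_id_list
--     # in place (+=) and returns it, like the original.
--     if nshift not in (3, 5, 15):
--         raise Exception('nshift must be 3, 5 or 15')
--     batch_num = {3: 45, 5: 100, 15: 225}[nshift]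
--     k = nshift * nshift - 1
--     batch_step = batch_num if group_mode == 0 else batch_num - k
--     batch_max_len = batch_num if group_mode == 0 else batch_num + batch_step
--     q = (total_wigner_num - batch_max_len) // batch_step + 1
--     n = q if q > 0 else 0          # number of full intervals
--     out = [[n * batch_step, total_wigner_num]]
--     lo = n * batch_step - batch_step
--     while lo >= 0:
--         out.insert(0, [lo, lo + batch_num])
--         lo -= batch_step
--     batch_id_list += out
--     return batch_id_list
-- ===== Notes on version B (the rewrite author's own statement) =====
-- stated objective: alternative
-- what changed: B builds the output back-to-front: it starts from the tail pair, computes the last full start via integer division, and prepends the full intervals while walking DOWN to 0, instead of A's ascending while-loop that appends; the nshift table is a dict lookup.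
import Mathlib
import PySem

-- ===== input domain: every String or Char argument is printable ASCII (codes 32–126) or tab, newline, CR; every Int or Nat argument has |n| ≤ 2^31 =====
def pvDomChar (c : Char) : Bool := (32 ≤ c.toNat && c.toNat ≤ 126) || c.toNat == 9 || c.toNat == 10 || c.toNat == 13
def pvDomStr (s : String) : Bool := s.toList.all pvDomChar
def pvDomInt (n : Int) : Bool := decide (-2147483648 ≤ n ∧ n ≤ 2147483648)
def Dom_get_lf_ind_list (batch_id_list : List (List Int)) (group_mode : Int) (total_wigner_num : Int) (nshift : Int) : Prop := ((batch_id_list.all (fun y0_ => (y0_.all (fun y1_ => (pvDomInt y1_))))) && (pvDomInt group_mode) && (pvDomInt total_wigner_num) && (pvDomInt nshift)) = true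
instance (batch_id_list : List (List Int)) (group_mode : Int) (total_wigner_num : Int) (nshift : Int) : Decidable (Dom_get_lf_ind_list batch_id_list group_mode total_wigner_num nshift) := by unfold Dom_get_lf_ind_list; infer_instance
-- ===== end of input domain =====

-- B builds the result back-to-front (tail pair first, full intervals prepended walking down from
-- the last full start) instead of A's ascending while-loop (objective: alternative).
-- Both A and B mutate the passed-in list in Python (append / +=); the theorems are about the return value.

-- ===== PORT A =====
-- A's ascending while loop; fuel only makes it total (batch_step ≥ 1 on every input Pre_ admits,
-- so the fuel total_wigner_num.toNat + 1 never runs out there)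
def pvLoopA (batch_num batch_step batch_max_len total : Int) : Nat → Int → List (List Int) → List (List Int)
  | 0, lf_id0, acc => acc ++ [[lf_id0, total]]
  | fuel+1, lf_id0, acc =>
    if lf_id0 + batch_max_len ≤ total then
      pvLoopA batch_num batch_step batch_max_len total fuel (lf_id0 + batch_step)
        (acc ++ [[lf_id0, lf_id0 + batch_num]])
    else acc ++ [[lf_id0, total]]

def get_lf_ind_list (batch_id_list : List (List Int)) (group_mode : Int) (total_wigner_num : Int) (nshift : Int) : List (List Int) :=
  match (if nshift = 3 then some (45 : Int) else if nshift = 5 then some 100 else if nshift = 15 then some 225 else none) with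
  | none => batch_id_list  -- Python raises Exception here (outside Pre_)
  | some batch_num =>
    let batch_step : Int := if group_mode = 0 then batch_num else batch_num - nshift^2 + 1
    let batch_max_len : Int := if group_mode = 0 then batch_num else 2 * batch_num - nshift^2 + 1
    pvLoopA batch_num batch_step batch_max_len total_wigner_num (total_wigner_num.toNat + 1) 0 batch_id_list

-- ===== PORT B =====
-- B's descending while loop (list.insert(0, …) = cons); fuel only makes it total
-- (on Pre_ inputs batch_step ≥ 1, so the fuel (lo0).toNat + 1 suffices)
def pvLoopB (batch_num batch_step : Int) : Nat → Int → List (List Int) → List (List Int)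
  | 0, _, out => out
  | fuel+1, lo, out =>
    if 0 ≤ lo then
      pvLoopB batch_num batch_step fuel (lo - batch_step) ([lo, lo + batch_num] :: out)
    else out

def get_lf_ind_list_alt (batch_id_list : List (List Int)) (group_mode : Int) (total_wigner_num : Int) (nshift : Int) : List (List Int) :=
  if nshift = 3 ∨ nshift = 5 ∨ nshift = 15 then
    let batch_num : Int := if nshift = 3 then 45 else if nshift = 5 then 100 else 225
    let k : Int := nshift * nshift - 1
    let batch_step : Int := if group_mode = 0 then batch_num else batch_num - k
    let batch_max_len : Int := if group_mode = 0 then batch_num else batch_num + batch_step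
    let q : Int := PySem.Int.floordiv (total_wigner_num - batch_max_len) batch_step + 1
    let n : Int := if q > 0 then q else 0
    let lo0 : Int := n * batch_step - batch_step
    batch_id_list ++ pvLoopB batch_num batch_step (lo0.toNat + 1) lo0 [[n * batch_step, total_wigner_num]]
  else batch_id_list  -- Python raises Exception here (outside Pre_)

-- ===== PRECONDITION & SPEC =====
-- A raises Exception('nshift must be 3, 5 or 15') for every other nshift; Pre_ excludes exactly those inputs.
def Pre_get_lf_ind_list (batch_id_list : List (List Int)) (group_mode : Int) (total_wigner_num : Int) (nshift : Int) : Prop :=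
  nshift = 3 ∨ nshift = 5 ∨ nshift = 15
instance (batch_id_list : List (List Int)) (group_mode : Int) (total_wigner_num : Int) (nshift : Int) : Decidable (Pre_get_lf_ind_list batch_id_list group_mode total_wigner_num nshift) := by unfold Pre_get_lf_ind_list; infer_instance
def pvWitness_get_lf_ind_list : List (List Int) × Int × Int × Int := ([[0, 45]], 1, 100, 3)

def Spec_get_lf_ind_list (batch_id_list : List (List Int)) (group_mode : Int) (total_wigner_num : Int) (nshift : Int) (out : List (List Int)) : Prop := out = get_lf_ind_list_alt batch_id_list group_mode total_wigner_num nshift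
instance (batch_id_list : List (List Int)) (group_mode : Int) (total_wigner_num : Int) (nshift : Int) (out : List (List Int)) : Decidable (Spec_get_lf_ind_list batch_id_list group_mode total_wigner_num nshift out) := by unfold Spec_get_lf_ind_list; infer_instance

-- ===== CLAIM (what is proved, stated in full; the proofs are below) =====
def Claim_equal_get_lf_ind_list : Prop := ∀ (batch_id_list : List (List Int)) (group_mode : Int) (total_wigner_num : Int) (nshift : Int), Dom_get_lf_ind_list batch_id_list group_mode total_wigner_num nshift → Pre_get_lf_ind_list batch_id_list group_mode total_wigner_num nshift → Spec_get_lf_ind_list batch_id_list group_mode total_wigner_num nshift (get_lf_ind_list batch_id_list group_mode total_wigner_num nshift)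

-- ===== LEMMAS AND PROOFS =====

-- A's loop, started at (cnt - r)·step with r iterations remaining, emits exactly those r intervals then the tail pair
lemma pvLoopA_range (bn step ml t : Int) (cnt : Nat)
    (hend : t < (cnt : Int) * step + ml)
    (hub : ∀ j : Nat, j < cnt → (j : Int) * step + ml ≤ t) :
    ∀ r : Nat, r ≤ cnt → ∀ fuel : Nat, r ≤ fuel → ∀ acc : List (List Int),
      pvLoopA bn step ml t fuel (((cnt - r : Nat) : Int) * step) acc =
        acc ++ (List.range' (cnt - r) r).map (fun i => [((i : Nat) : Int) * step, ((i : Nat) : Int) * step + bn])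
            ++ [[(cnt : Int) * step, t]] := by
  intro r
  induction r with
  | zero =>
    intro _ fuel _ acc
    have hlt : ¬ (((cnt : Int)) * step + ml ≤ t) := not_le.mpr hend
    cases fuel with
    | zero => simp [pvLoopA]
    | succ f => simp [pvLoopA, hlt]
  | succ r ih =>
    intro hr fuel hf acc
    obtain ⟨f, rfl⟩ : ∃ f, fuel = f + 1 := ⟨fuel - 1, by omega⟩
    have hjlt : cnt - (r+1) < cnt := by omega
    have hcond : ((cnt - (r+1) : Nat) : Int) * step + ml ≤ t := hub _ hjlt
    have hstepix : ((cnt - (r+1) : Nat) : Int) * step + step = ((cnt - r : Nat) : Int) * step := by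
      have : ((cnt - (r+1) : Nat) : Int) + 1 = ((cnt - r : Nat) : Int) := by omega
      nlinarith [this]
    have hrange : List.range' (cnt - (r+1)) (r+1) = (cnt - (r+1)) :: List.range' (cnt - r) r := by
      have h1 : cnt - (r+1) + 1 = cnt - r := by omega
      rw [List.range'_succ, h1]
    rw [show pvLoopA bn step ml t (f+1) (((cnt - (r+1) : Nat) : Int) * step) acc =
        pvLoopA bn step ml t f ((((cnt - (r+1) : Nat) : Int) * step) + step)
          (acc ++ [[((cnt - (r+1) : Nat) : Int) * step, ((cnt - (r+1) : Nat) : Int) * step + bn]]) from by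
      simp [pvLoopA, hcond]]
    rw [hstepix, ih (by omega) f (by omega)]
    simp [hrange, List.append_assoc]

-- A's loop in closed form: the intervals for 0 ≤ i < cnt, then the tail pair
lemma pvLoopA_closed (bn step ml t : Int) (bidl : List (List Int))
    (hstep : 0 < step) (hml : 0 < ml) :
    pvLoopA bn step ml t (t.toNat + 1) 0 bidl =
      bidl ++ (List.range (max 0 (PySem.Int.floordiv (t - ml) step + 1)).toNat).map
                (fun i => [((i : Nat) : Int) * step, ((i : Nat) : Int) * step + bn])
           ++ [[(max 0 (PySem.Int.floordiv (t - ml) step + 1)) * step, t]] := by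
  set q : Int := PySem.Int.floordiv (t - ml) step with hq
  have hqb : q * step ≤ t - ml ∧ t - ml < (q + 1) * step :=
    (PySem.Int.floordiv_eq_iff_of_pos hstep).mp hq.symm
  set cI : Int := max 0 (q + 1) with hcI
  have hcI0 : 0 ≤ cI := le_max_left _ _
  set cnt : Nat := cI.toNat with hcnt
  have hcast : (cnt : Int) = cI := Int.toNat_of_nonneg hcI0
  have hend : t < (cnt : Int) * step + ml := by
    rw [hcast]
    rcases le_or_gt (q + 1) 0 with h | h
    · have : cI = 0 := by simp [hcI]; omega
      rw [this]
      have : (q + 1) * step ≤ 0 := mul_nonpos_of_nonpos_of_nonneg (by omega) (by omega)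
      nlinarith [hqb.2]
    · have : cI = q + 1 := by simp [hcI]; omega
      rw [this]; nlinarith [hqb.2]
  have hub : ∀ j : Nat, j < cnt → (j : Int) * step + ml ≤ t := by
    intro j hj
    have hjq : (j : Int) ≤ q := by
      have : (j : Int) < cI := by rw [← hcast]; exact_mod_cast hj
      simp [hcI] at this; omega
    have : (j : Int) * step ≤ q * step := mul_le_mul_of_nonneg_right hjq (by omega)
    nlinarith [hqb.1]
  have hfuel : cnt ≤ t.toNat + 1 := by
    rcases le_or_gt (q + 1) 0 with h | h
    · have : cI = 0 := by simp [hcI]; omega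
      omega
    · have hc : cI = q + 1 := by simp [hcI]; omega
      have hq0 : 0 ≤ q := by omega
      have : q * 1 ≤ q * step := mul_le_mul_of_nonneg_left (by omega) hq0
      have hqt : q ≤ t - ml := by nlinarith [hqb.1]
      omega
  have h0 : (0 : Int) = ((cnt - cnt : Nat) : Int) * step := by simp
  rw [h0, pvLoopA_range bn step ml t cnt hend hub cnt (le_refl _) (t.toNat + 1) hfuel bidl]
  congr 2
  · rw [List.range_eq_range']
    simp
  · rw [hcast]

-- B's descending loop, started at (m-1)·step, prepends exactly the full intervals 0 … m-1
lemma pvLoopB_desc (bn step : Int) (hstep : 0 < step) :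
    ∀ m : Nat, ∀ fuel : Nat, m ≤ fuel → ∀ out : List (List Int),
      pvLoopB bn step fuel ((m : Int) * step - step) out =
        (List.range m).map (fun i => [((i : Nat) : Int) * step, ((i : Nat) : Int) * step + bn]) ++ out := by
  intro m
  induction m with
  | zero =>
    intro fuel _ out
    cases fuel with
    | zero => simp [pvLoopB]
    | succ f =>
      have hneg : ¬ (0 : Int) ≤ ((0 : Nat) : Int) * step - step := by
        simp only [Nat.cast_zero, zero_mul, zero_sub]; omega
      simp only [pvLoopB]
      rw [if_neg hneg]
      simp
  | succ m ih =>
    intro fuel hf out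
    obtain ⟨f, rfl⟩ : ∃ f, fuel = f + 1 := ⟨fuel - 1, by omega⟩
    have hlo : ((m + 1 : Nat) : Int) * step - step = (m : Int) * step := by push_cast; ring
    have hpos : (0 : Int) ≤ ((m + 1 : Nat) : Int) * step - step := by
      rw [hlo]; positivity
    simp only [pvLoopB]
    rw [if_pos hpos,
        show (((m + 1 : Nat) : Int) * step - step) - step = (m : Int) * step - step from by push_cast; ring,
        ih f (by omega), List.range_succ]
    simp
    ring

-- B's loop with its actual fuel, for a nonnegative count n
lemma pvLoopB_closed (bn step t : Int) (bidl : List (List Int)) (hstep : 0 < step)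
    (n : Int) (hn : 0 ≤ n) :
    bidl ++ pvLoopB bn step ((n * step - step).toNat + 1) (n * step - step) [[n * step, t]] =
      bidl ++ (List.range n.toNat).map
                (fun i => [((i : Nat) : Int) * step, ((i : Nat) : Int) * step + bn])
           ++ [[n * step, t]] := by
  have hcast : ((n.toNat : Nat) : Int) = n := Int.toNat_of_nonneg hn
  have hfuel : n.toNat ≤ (n * step - step).toNat + 1 := by
    rcases eq_or_lt_of_le hn with h | h
    · simp [← h]
    · have h1 : 1 ≤ n := h
      have h3 : n - 1 ≤ n * step - step := by nlinarith
      calc n.toNat = (n - 1).toNat + 1 := by omega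
        _ ≤ (n * step - step).toNat + 1 := Nat.add_le_add_right (Int.toNat_le_toNat h3) 1
  have := pvLoopB_desc bn step hstep n.toNat ((n * step - step).toNat + 1) hfuel [[n * step, t]]
  rw [hcast] at this
  rw [this, List.append_assoc]

-- if-then-else positivity clamp is max
lemma ite_pos_max (q : Int) : (if q > 0 then q else 0) = max 0 q := by
  split_ifs with h <;> omega

-- ===== VERDICT (by name: the statement is the Claim_ definition above) =====
theorem get_lf_ind_list_spec : Claim_equal_get_lf_ind_list := by
  intro bidl gm t ns _ hpre
  unfold Spec_get_lf_ind_list get_lf_ind_list get_lf_ind_list_alt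
  rw [if_pos (show ns = 3 ∨ ns = 5 ∨ ns = 15 from hpre)]
  rcases hpre with rfl | rfl | rfl <;> by_cases hg : gm = 0 <;>
    simp only [hg, ite_pos_max, Int.reduceEq, reduceIte] <;>
    rw [pvLoopA_closed _ _ _ t bidl (by norm_num) (by norm_num),
        pvLoopB_closed _ _ t bidl (by norm_num) _ (le_max_left _ _)] <;>
    norm_num
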